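-- pv_equiv track=rewrite | github.com/masterzenith/code-pattern-practice | algoexpert/DynamicProgramming/hard/square_of_zeroes.py | square_of_zeroes
-- ===== SOURCE A (Python) =====
-- def square_of_zeroes(matrix):
--     info_matrix = pre_compute_num_of_zeroes(matrix)
--     n = len(matrix)
--     for top_row in range(n):
--         for left_col in range(n):
--             square_length = 2
--             while square_length <= n - left_col and square_length <= n - top_row:
--                 bottom_row = top_row + square_length - 1
--                 right_col = left_col + square_length - 1
--                 if is_square_of_zeroes(info_matrix, top_row, left_col, bottom_row, right_col):
--                     return True
--                 square_length += 1
--     return False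
--
-- def is_square_of_zeroes(info_matrix, r1, c1, r2, c2):
--     square_length = c2 - c1 + 1
--     has_top_border = info_matrix[r1][c1]["num_zeroes_right"] >= square_length
--     has_left_border = info_matrix[r1][c1]["num_zeroes_below"] >= square_length
--     has_bottom_border = info_matrix[r2][c1]["num_zeroes_right"] >= square_length
--     has_right_border = info_matrix[r1][c2]["num_zeroes_below"] >= square_length
--     return has_top_border and has_left_border and has_bottom_border and has_right_border
--
-- def pre_compute_num_of_zeroes(matrix):
--     info_matrix = [[x for x in row] for row in matrix]
--     n = len(matrix)
--     for row in range(n):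
--         for col in range(n):
--             num_zeroes = 1 if matrix[row][col] == 0 else 0
--             info_matrix[row][col] = {
--                 "num_zeroes_below": num_zeroes,
--                 "num_zeroes_right": num_zeroes,
--             }
--     last_idx = len(matrix) - 1
--     for row in reversed(range(n)):
--         for col in reversed(range(n)):
--             if matrix[row][col] == 1:
--                 continue
--             if row < last_idx:
--                 info_matrix[row][col]["num_zeroes_below"] += info_matrix[row+1][col]["num_zeroes_below"]
--             if col < last_idx:
--                 info_matrix[row][col]["num_zeroes_right"] += info_matrix[row][col+1]["num_zeroes_right"]
--     return info_matrix
-- ===== SOURCE B (Python) =====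
-- def square_of_zeroes(matrix):
--     n = len(matrix)
--     for length in range(2, n + 1):
--         for top in range(n - length + 1):
--             for left in range(n - length + 1):
--                 bottom = top + length - 1
--                 right = left + length - 1
--                 if (_zeros_right(matrix, top, left) >= length
--                         and _zeros_below(matrix, top, left) >= length
--                         and _zeros_right(matrix, bottom, left) >= length
--                         and _zeros_below(matrix, top, right) >= length):
--                     return True
--     return False
--
--
-- def _zeros_right(matrix, r, c):
--     # zeros in row r from column c up to (and including) the first cell equal to 1,
--     # or the end of the first n columns
--     count = 0
--     for j in range(c, len(matrix)):
--         v = matrix[r][j]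
--         if v == 0:
--             count += 1
--         if v == 1:
--             break
--     return count
--
--
-- def _zeros_below(matrix, r, c):
--     count = 0
--     for i in range(r, len(matrix)):
--         v = matrix[i][c]
--         if v == 0:
--             count += 1
--         if v == 1:
--             break
--     return count
-- ===== Notes on version B (the rewrite author's own statement) =====
-- stated objective: simpler
-- what changed: Dropped A's dict-of-dicts dynamic-programming precompute entirely: B is a plain brute-force search that, for each candidate square, scans its four borders directly, counting zeros up to the first 1, with the square length as the outer loop.
import Mathlib
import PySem

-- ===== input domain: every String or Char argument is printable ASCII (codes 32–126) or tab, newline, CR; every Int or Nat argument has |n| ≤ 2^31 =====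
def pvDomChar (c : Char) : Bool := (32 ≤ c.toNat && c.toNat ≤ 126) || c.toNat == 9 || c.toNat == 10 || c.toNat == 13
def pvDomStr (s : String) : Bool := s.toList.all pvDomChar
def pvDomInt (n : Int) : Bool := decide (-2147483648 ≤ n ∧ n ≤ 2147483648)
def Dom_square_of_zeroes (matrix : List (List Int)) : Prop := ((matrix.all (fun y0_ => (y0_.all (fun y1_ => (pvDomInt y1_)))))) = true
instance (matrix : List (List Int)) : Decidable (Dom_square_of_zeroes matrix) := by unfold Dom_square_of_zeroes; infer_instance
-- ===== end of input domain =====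

-- B drops A's dynamic-programming precompute entirely and brute-force scans the four
-- borders of each candidate square directly (square length as the outer loop); simpler,
-- no table, at the cost of rescanning borders.

-- ===== PORT A =====
-- A's per-cell dict {"num_zeroes_below", "num_zeroes_right"} becomes the two-field structure PvInfo.
structure PvInfo where
  below : Int
  right : Int
deriving Repr, DecidableEq

def pvNz (v : Int) : Int := if v = 0 then 1 else 0

-- the reversed inner column loop of `pre_compute_num_of_zeroes` for one row:
-- each cell starts at (nz, nz) and, unless the entry equals 1, adds the "below" of the
-- cell beneath (passed in as the Option component; none on the last row) and the
-- "right" of the cell to its right (the head of the already-built tail).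
def pvRowGo : List (Int × Option Int) → List PvInfo
  | [] => []
  | (v, b) :: rest =>
    let tail := pvRowGo rest
    if v = 1 then ⟨pvNz v, pvNz v⟩ :: tail
    else ⟨pvNz v + b.getD 0, pvNz v + (match tail with | [] => 0 | i :: _ => i.right)⟩ :: tail

-- the reversed outer row loop: rows are built bottom-up
def pvBuildRows : List (List Int) → List (List PvInfo)
  | [] => []
  | vals :: rest =>
    let below := pvBuildRows rest
    let belowB : List (Option Int) :=
      match below with
      | [] => vals.map fun _ => none
      | r :: _ => r.map fun i => some i.below
    pvRowGo (vals.zip belowB) :: below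

def pvIsq (info : List (List PvInfo)) (r1 c1 r2 c2 : Nat) : Bool :=
  let at_ := fun r c => (info.getD r []).getD c ⟨0, 0⟩
  let sq : Int := (c2 : Int) - (c1 : Int) + 1
  decide (sq ≤ (at_ r1 c1).right) && decide (sq ≤ (at_ r1 c1).below) &&
    decide (sq ≤ (at_ r2 c1).right) && decide (sq ≤ (at_ r1 c2).below)

def square_of_zeroes (matrix : List (List Int)) : Bool :=
  let n := matrix.length
  let rows := (List.range n).map fun r => (List.range n).map fun c => (matrix.getD r []).getD c 0
  let info := pvBuildRows rows
  (List.range n).any fun top =>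
    (List.range n).any fun left =>
      (List.range' 2 (min (n - left) (n - top) - 1)).any fun L =>
        pvIsq info top left (top + L - 1) (left + L - 1)

-- ===== PORT B =====
-- body of Source B's _zeros_right/_zeros_below loop on the list of visited values:
-- count zeros, stop right after the first cell equal to 1
def pvScanZ : List Int → Int
  | [] => 0
  | v :: rest =>
    let inc : Int := if v = 0 then 1 else 0
    if v = 1 then inc else inc + pvScanZ rest

def pvZerosRight (m : List (List Int)) (n r c : Nat) : Int :=
  pvScanZ ((List.range' c (n - c)).map fun j => (m.getD r []).getD j 0)

def pvZerosBelow (m : List (List Int)) (n r c : Nat) : Int :=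
  pvScanZ ((List.range' r (n - r)).map fun i => (m.getD i []).getD c 0)

def square_of_zeroes_alt (matrix : List (List Int)) : Bool :=
  let n := matrix.length
  (List.range' 2 (n - 1)).any fun L =>
    (List.range (n - L + 1)).any fun top =>
      (List.range (n - L + 1)).any fun left =>
        decide ((L : Int) ≤ pvZerosRight matrix n top left) &&
          decide ((L : Int) ≤ pvZerosBelow matrix n top left) &&
          decide ((L : Int) ≤ pvZerosRight matrix n (top + L - 1) left) &&
          decide ((L : Int) ≤ pvZerosBelow matrix n top (left + L - 1))

-- ===== PRECONDITION & SPEC =====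
-- Pre_: Python A indexes matrix[row][col] for all row, col < len(matrix), so it raises
-- IndexError exactly when some row is shorter than the number of rows.
def Pre_square_of_zeroes (matrix : List (List Int)) : Prop :=
  ∀ row ∈ matrix, matrix.length ≤ row.length
instance (matrix : List (List Int)) : Decidable (Pre_square_of_zeroes matrix) := by
  unfold Pre_square_of_zeroes; infer_instance

def pvWitness_square_of_zeroes : List (List Int) := [[0, 0], [0, 0]]

def Spec_square_of_zeroes (matrix : List (List Int)) (out : Bool) : Prop := out = square_of_zeroes_alt matrix
instance (matrix : List (List Int)) (out : Bool) : Decidable (Spec_square_of_zeroes matrix out) := by unfold Spec_square_of_zeroes; infer_instance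

-- ===== CLAIM (what is proved, stated in full; the proofs are below) =====
def Claim_equal_square_of_zeroes : Prop := ∀ (matrix : List (List Int)), Dom_square_of_zeroes matrix → Pre_square_of_zeroes matrix → Spec_square_of_zeroes matrix (square_of_zeroes matrix)

-- ===== LEMMAS AND PROOFS =====

-- value read at (r, c), and row r / column c of the truncated n×n matrix
def pvVal (m : List (List Int)) (r c : Nat) : Int := (m.getD r []).getD c 0
def pvW (m : List (List Int)) (n r : Nat) : List Int := (List.range n).map fun c => pvVal m r c
def pvCcol (m : List (List Int)) (n c : Nat) : List Int := (List.range n).map fun r => pvVal m r c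

-- common semantic value: zeroes from the head up to and including the first 1 (or the end)
def pvZrec : List Int → Int
  | [] => 0
  | v :: rest => if v = 1 then 0 else pvNz v + pvZrec rest

-- the common check both ports compute for a candidate square
def pvChk (m : List (List Int)) (t l L : Nat) : Bool :=
  decide ((L : Int) ≤ pvZrec ((pvW m m.length t).drop l)) &&
    decide ((L : Int) ≤ pvZrec ((pvCcol m m.length l).drop t)) &&
    decide ((L : Int) ≤ pvZrec ((pvW m m.length (t + L - 1)).drop l)) &&
    decide ((L : Int) ≤ pvZrec ((pvCcol m m.length (l + L - 1)).drop t))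

theorem getD_map_range {α : Type} (f : Nat → α) (n c : Nat) (d : α) (h : c < n) :
    ((List.range n).map f).getD c d = f c := by
  rw [List.getD_eq_getElem _ _ (by simp [h])]; simp

theorem getD_map {α β : Type} (f : α → β) (l : List α) (i : Nat) (d : β) (d' : α)
    (h : i < l.length) : (l.map f).getD i d = f (l.getD i d') := by
  rw [List.getD_eq_getElem _ _ (by simp [h]), List.getElem_map, List.getD_eq_getElem _ _ h]

theorem zip_getD {α β : Type} (l1 : List α) (l2 : List β) (c : Nat) (d1 : α) (d2 : β)
    (h1 : c < l1.length) (h2 : c < l2.length) :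
    (l1.zip l2).getD c (d1, d2) = (l1.getD c d1, l2.getD c d2) := by
  rw [List.getD_eq_getElem _ _ (by simp [List.length_zip]; omega), List.getElem_zip,
    List.getD_eq_getElem _ _ h1, List.getD_eq_getElem _ _ h2]

theorem pvBuildRows_length (rows : List (List Int)) :
    (pvBuildRows rows).length = rows.length := by
  induction rows with
  | nil => rfl
  | cons vals rest ih => simp [pvBuildRows, ih]

theorem pvRowGo_length (ps : List (Int × Option Int)) : (pvRowGo ps).length = ps.length := by
  induction ps with
  | nil => rfl
  | cons p rest ih =>
    obtain ⟨v, b⟩ := p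
    simp only [pvRowGo]
    split <;> simp [ih]

theorem pvRowGo_right (vals : List Int) : ∀ (bs : List (Option Int)), vals.length = bs.length →
    ∀ c < vals.length,
      (((pvRowGo (vals.zip bs)).getD c ⟨0, 0⟩)).right = pvZrec (vals.drop c) := by
  induction vals with
  | nil => intro bs h c hc; simp at hc
  | cons v rest ih =>
    intro bs h c hc
    cases bs with
    | nil => simp at h
    | cons b bs' =>
      have hlen : rest.length = bs'.length := by simpa using h
      simp only [List.zip_cons_cons, pvRowGo]
      cases c with
      | zero =>
        simp only [List.drop_zero, pvZrec]
        by_cases hv : v = 1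
        · simp [hv, pvNz]
        · rw [if_neg hv, if_neg hv]
          simp only [List.getD_cons_zero]
          congr 1
          cases hrg : pvRowGo (rest.zip bs') with
          | nil =>
            have hlz := pvRowGo_length (rest.zip bs')
            rw [hrg] at hlz
            simp only [List.length_nil, List.length_zip, ← hlen, Nat.min_self] at hlz
            have : rest = [] := List.eq_nil_of_length_eq_zero (by omega)
            subst this
            simp [pvZrec]
          | cons i tl =>
            have hlz := pvRowGo_length (rest.zip bs')
            rw [hrg] at hlz
            simp only [List.length_cons, List.length_zip, ← hlen, Nat.min_self] at hlz
            have h0 := ih bs' hlen 0 (by omega)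
            rw [hrg] at h0
            simp only [List.getD_cons_zero, List.drop_zero] at h0
            simp [h0]
      | succ c' =>
        have hc' : c' < rest.length := by simpa using hc
        have := ih bs' hlen c' hc'
        split <;> simpa using this

theorem pvRowGo_below (ps : List (Int × Option Int)) :
    ∀ c < ps.length,
      (((pvRowGo ps).getD c ⟨0, 0⟩)).below =
        (fun p : Int × Option Int => if p.1 = 1 then 0 else pvNz p.1 + p.2.getD 0)
          (ps.getD c (0, none)) := by
  induction ps with
  | nil => intro c hc; simp at hc
  | cons p rest ih =>
    obtain ⟨v, b⟩ := p
    intro c hc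
    simp only [pvRowGo]
    cases c with
    | zero =>
      by_cases hv : v = 1
      · simp [hv, pvNz]
      · simp [hv]
    | succ c' =>
      have hc' : c' < rest.length := by simpa using hc
      have := ih c' hc'
      split <;> simpa using this

theorem pvBuildRows_width (n : Nat) (rows : List (List Int)) (h : ∀ row ∈ rows, row.length = n) :
    ∀ row' ∈ pvBuildRows rows, row'.length = n := by
  induction rows with
  | nil => intro r hr; simp [pvBuildRows] at hr
  | cons vals rest ih =>
    intro r' hr'
    have hv : vals.length = n := h vals (by simp)
    have hrest : ∀ row ∈ rest, row.length = n := fun row hrow => h row (by simp [hrow])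
    simp only [pvBuildRows] at hr'
    rcases List.mem_cons.1 hr' with h1 | h2
    · subst h1
      rw [pvRowGo_length, List.length_zip]
      cases hb : pvBuildRows rest with
      | nil => simp [hv]
      | cons r0 tl =>
        have hr0 : r0.length = n := ih hrest r0 (by rw [hb]; simp)
        simp [hv, hr0]
    · exact ih hrest r' h2

theorem pvBuildRows_below (n : Nat) (rows : List (List Int)) (h : ∀ row ∈ rows, row.length = n)
    (c : Nat) (hc : c < n) :
    ∀ r < rows.length,
      ((((pvBuildRows rows).getD r []).getD c ⟨0, 0⟩)).below =
        pvZrec ((rows.drop r).map (fun row => row.getD c 0)) := by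
  induction rows with
  | nil => intro r hr; simp at hr
  | cons vals rest ih =>
    have hv : vals.length = n := h vals (by simp)
    have hrest : ∀ row ∈ rest, row.length = n := fun row hrow => h row (by simp [hrow])
    intro r hr
    cases r with
    | zero =>
      simp only [pvBuildRows, List.getD_cons_zero, List.drop_zero]
      cases hb : pvBuildRows rest with
      | nil =>
        have hrnil : rest = [] := by
          have := pvBuildRows_length rest
          rw [hb] at this
          exact List.eq_nil_of_length_eq_zero (by simpa using this.symm)
        subst hrnil
        have hzlen : c < (vals.zip (vals.map (fun _ => (none : Option Int)))).length := by
          simp [List.length_zip, hv]; omega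
        rw [pvRowGo_below _ c hzlen,
          zip_getD _ _ _ _ _ (by omega) (by simp [hv]; omega),
          getD_map _ _ _ _ 0 (by omega)]
        simp only [List.map_cons, List.map_nil, pvZrec, Option.getD_none]
      | cons r0 tl =>
        have hr0 : r0.length = n := pvBuildRows_width n rest hrest r0 (by rw [hb]; simp)
        have hlen0 : 0 < rest.length := by
          have := pvBuildRows_length rest
          rw [hb] at this
          simp at this
          omega
        have hzlen : c < (vals.zip (r0.map (fun i => some i.below))).length := by
          simp [List.length_zip, hv, hr0]; omega
        rw [pvRowGo_below _ c hzlen,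
          zip_getD _ _ _ _ _ (by omega) (by simp [hr0]; omega),
          getD_map _ _ _ _ ⟨0, 0⟩ (by omega)]
        have hih := ih hrest 0 hlen0
        rw [hb] at hih
        simp only [List.getD_cons_zero, List.drop_zero] at hih
        simp only [List.map_cons, pvZrec]
        rw [hih]
        simp only [Option.getD_some]
    | succ r' =>
      have hr' : r' < rest.length := by simpa using hr
      have := ih hrest r' hr'
      simp only [pvBuildRows, List.getD_cons_succ, List.drop_succ_cons]
      exact this

theorem pvBuildRows_right (n : Nat) (rows : List (List Int)) (h : ∀ row ∈ rows, row.length = n)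
    (c : Nat) (hc : c < n) :
    ∀ r < rows.length,
      ((((pvBuildRows rows).getD r []).getD c ⟨0, 0⟩)).right =
        pvZrec ((rows.getD r []).drop c) := by
  induction rows with
  | nil => intro r hr; simp at hr
  | cons vals rest ih =>
    have hv : vals.length = n := h vals (by simp)
    have hrest : ∀ row ∈ rest, row.length = n := fun row hrow => h row (by simp [hrow])
    intro r hr
    cases r with
    | zero =>
      simp only [pvBuildRows, List.getD_cons_zero]
      cases hb : pvBuildRows rest with
      | nil =>
        exact pvRowGo_right vals _ (by simp [hv]) c (by omega)
      | cons r0 tl =>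
        have hr0 : r0.length = n := pvBuildRows_width n rest hrest r0 (by rw [hb]; simp)
        exact pvRowGo_right vals _ (by simp [hv, hr0]) c (by omega)
    | succ r' =>
      have hr' : r' < rest.length := by simpa using hr
      have := ih hrest r' hr'
      simp only [pvBuildRows, List.getD_cons_succ]
      exact this

theorem transpose_col (m : List (List Int)) (n c r : Nat) (hc : c < n) :
    ((((List.range n).map fun i => (List.range n).map fun j => (m.getD i []).getD j 0).drop r).map
        (fun row => row.getD c 0)) =
      (((List.range n).map fun i => (m.getD i []).getD c 0).drop r) := by
  apply List.ext_getElem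
  · simp
  · intro i h1 h2
    simp only [List.getElem_map, List.getElem_drop, List.getElem_range]
    exact getD_map_range _ n c 0 hc

-- A's search check equals the common check
theorem A_chk (m : List (List Int)) (t l L : Nat) (h2 : 2 ≤ L)
    (ht : t + L ≤ m.length) (hl : l + L ≤ m.length) :
    pvIsq (pvBuildRows ((List.range m.length).map fun r =>
        (List.range m.length).map fun c => (m.getD r []).getD c 0))
      t l (t + L - 1) (l + L - 1) = pvChk m t l L := by
  have hn : 0 < m.length := by omega
  set n := m.length with hn'
  have hwid : ∀ row ∈ ((List.range n).map fun r =>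
      (List.range n).map fun c => (m.getD r []).getD c 0), row.length = n := by
    intro row hrow
    simp only [List.mem_map] at hrow
    obtain ⟨i, _, hi⟩ := hrow
    rw [← hi]; simp
  have hlenR : ((List.range n).map fun r =>
      (List.range n).map fun c => (m.getD r []).getD c 0).length = n := by simp
  have hRget : ∀ r < n, (((List.range n).map fun r =>
      (List.range n).map fun c => (m.getD r []).getD c 0).getD r []) = pvW m n r := by
    intro r hr
    rw [getD_map_range _ n r [] hr]
    rfl
  simp only [pvIsq, pvChk]
  have hsq : ((↑(l + L - 1) : Int) - ↑l + 1) = (L : Int) := by omega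
  rw [hsq]
  have hAr : ∀ r' c', r' < n → c' < n →
      ((((pvBuildRows ((List.range n).map fun r =>
          (List.range n).map fun c => (m.getD r []).getD c 0)).getD r' []).getD c' ⟨0, 0⟩)).right =
        pvZrec ((pvW m n r').drop c') := by
    intro r' c' hr' hc'
    rw [pvBuildRows_right n _ hwid c' hc' r' (by rw [hlenR]; exact hr'), hRget r' hr']
  have hAb : ∀ r' c', r' < n → c' < n →
      ((((pvBuildRows ((List.range n).map fun r =>
          (List.range n).map fun c => (m.getD r []).getD c 0)).getD r' []).getD c' ⟨0, 0⟩)).below =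
        pvZrec ((pvCcol m n c').drop r') := by
    intro r' c' hr' hc'
    rw [pvBuildRows_below n _ hwid c' hc' r' (by rw [hlenR]; exact hr'),
      transpose_col m n c' r' hc']
    rfl
  rw [hAr t l (by omega) (by omega), hAb t l (by omega) (by omega),
    hAr (t + L - 1) l (by omega) (by omega), hAb t (l + L - 1) (by omega) (by omega)]

-- B's scanning loop computes the same semantic value pvZrec
theorem pvScanZ_eq (vs : List Int) : pvScanZ vs = pvZrec vs := by
  induction vs with
  | nil => rfl
  | cons v rest ih =>
    by_cases hv : v = 1
    · subst hv; simp [pvScanZ, pvZrec]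
    · simp [pvScanZ, pvZrec, hv, pvNz, ih]

theorem range_drop_map (n m : Nat) (f : Nat → Int) :
    ((List.range n).map f).drop m = (List.range' m (n - m)).map f := by
  rw [← List.map_drop, List.range_eq_range', List.drop_range']
  simp

theorem B_zr (m : List (List Int)) (r c : Nat) :
    pvZerosRight m m.length r c = pvZrec ((pvW m m.length r).drop c) := by
  rw [pvZerosRight, pvScanZ_eq, pvW, range_drop_map]
  rfl

theorem B_zb (m : List (List Int)) (r c : Nat) :
    pvZerosBelow m m.length r c = pvZrec ((pvCcol m m.length c).drop r) := by
  rw [pvZerosBelow, pvScanZ_eq, pvCcol, range_drop_map]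
  rfl

theorem A_any (m : List (List Int)) :
    square_of_zeroes m = true ↔
      ∃ t l L, t + L ≤ m.length ∧ l + L ≤ m.length ∧ 2 ≤ L ∧ pvChk m t l L = true := by
  simp only [square_of_zeroes, List.any_eq_true, List.mem_range, List.mem_range'_1]
  constructor
  · rintro ⟨t, ht, l, hl, L, hL, hchk⟩
    refine ⟨t, l, L, by omega, by omega, by omega, ?_⟩
    rw [← A_chk m t l L (by omega) (by omega) (by omega)]
    exact hchk
  · rintro ⟨t, l, L, ht, hl, h2, hchk⟩
    refine ⟨t, by omega, l, by omega, L, by omega, ?_⟩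
    rw [A_chk m t l L (by omega) (by omega) (by omega)]
    exact hchk

theorem B_any (m : List (List Int)) :
    square_of_zeroes_alt m = true ↔
      ∃ t l L, t + L ≤ m.length ∧ l + L ≤ m.length ∧ 2 ≤ L ∧ pvChk m t l L = true := by
  simp only [square_of_zeroes_alt, List.any_eq_true, List.mem_range, List.mem_range'_1]
  constructor
  · rintro ⟨L, hL, t, ht, l, hl, hchk⟩
    refine ⟨t, l, L, by omega, by omega, by omega, ?_⟩
    rw [← hchk]
    simp only [pvChk, B_zr, B_zb]
  · rintro ⟨t, l, L, ht, hl, h2, hchk⟩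
    refine ⟨L, by omega, t, by omega, l, by omega, ?_⟩
    simp only [B_zr, B_zb]
    simpa only [pvChk] using hchk

theorem square_eq (m : List (List Int)) : square_of_zeroes m = square_of_zeroes_alt m := by
  rw [Bool.eq_iff_iff, A_any, B_any]

-- ===== VERDICT (by name: the statement is the Claim_ definition above) =====
theorem square_of_zeroes_spec : Claim_equal_square_of_zeroes := by
  intro m _ _
  unfold Spec_square_of_zeroes
  exact square_eq m
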